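-- pv_equiv track=rewrite | github.com/kaellandrade/SI_UFS | unid_1/Att4/quest_2.py | rabin_karp_MATCHER
-- ===== SOURCE A (Python) =====
-- def rabin_karp_MATCHER(texto, ArrPrefixs, d=256, q=3354393):
--
--     totalOcorr = 0
--     for pat in ArrPrefixs:
--         D = d  # Tabela ASCII
--         M = len(pat)
--         h = pow(d, M-1) % q
--         p = 0  # Valor hash para o padrão
--         N = len(texto)
--         t = 0  # Valor hash para o texto
--
--         for i in range(M):  # Pré-Processamento
--             p = (d*p + ord(pat[i])) % q
--             t = (d*t + ord(texto[i])) % q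
--
--         for s in range(N-M+1):
--             if(p == t):
--                 if(pat == texto[s:s+M]):
--                     totalOcorr += 1
--             if(s < N-M):
--                 t = (D*(t-ord(texto[s])*h) + ord(texto[s+M])) % q
--                 if(t < 0):
--                     t = t+q
--     return totalOcorr
-- ===== SOURCE B (Python) =====
-- def rabin_karp_MATCHER(texto, ArrPrefixs, d=256, q=3354393):
--     # Direct matcher: anchor each pattern on its first character and verify the
--     # slice only there; no hashing, so d and q are unused.
--     N = len(texto)
--     total = 0
--     for pat in ArrPrefixs:
--         c0 = pat[0]
--         M = len(pat)
--         for s in range(N - M + 1):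
--             if texto[s] == c0 and texto[s:s + M] == pat:
--                 total += 1
--     return total
-- ===== Notes on version B (the rewrite author's own statement) =====
-- stated objective: faster
-- what changed: Replaces the per-pattern Rabin-Karp rolling-hash scan (hash precomputation, big-int modular rolling update, hash-then-verify) by a direct scan that anchors each pattern on its first character and compares the slice only there, dropping all modular arithmetic; d and q become unused.
-- intended difference: On q < 0 with some pattern whose polynomial hash q does not divide occurring in the text at a start position >= 1, A returns an undercount (its 't = t+q' fix-up pushes the rolling hash below Python's canonical residue range for a negative modulus, so the hash test misses exactly those matches), while B returns the true occurrence count, the intended value. — e.g. on rabin_karp_MATCHER("abab", ["ab"], 256, -7): A returns 1, B returns 2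
-- outside the precondition, e.g. on rabin_karp_MATCHER('ab', [''], 3, 7): A returns 1, B raises IndexError
-- crash fix: On q = 0 with a nonempty pattern list, and on patterns longer than texto, A raises (ZeroDivisionError resp. IndexError) while B returns the plain occurrence count. — e.g. on rabin_karp_MATCHER("ab", ["abc"], 256, 7): A raises IndexError, B returns 0
import Mathlib
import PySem

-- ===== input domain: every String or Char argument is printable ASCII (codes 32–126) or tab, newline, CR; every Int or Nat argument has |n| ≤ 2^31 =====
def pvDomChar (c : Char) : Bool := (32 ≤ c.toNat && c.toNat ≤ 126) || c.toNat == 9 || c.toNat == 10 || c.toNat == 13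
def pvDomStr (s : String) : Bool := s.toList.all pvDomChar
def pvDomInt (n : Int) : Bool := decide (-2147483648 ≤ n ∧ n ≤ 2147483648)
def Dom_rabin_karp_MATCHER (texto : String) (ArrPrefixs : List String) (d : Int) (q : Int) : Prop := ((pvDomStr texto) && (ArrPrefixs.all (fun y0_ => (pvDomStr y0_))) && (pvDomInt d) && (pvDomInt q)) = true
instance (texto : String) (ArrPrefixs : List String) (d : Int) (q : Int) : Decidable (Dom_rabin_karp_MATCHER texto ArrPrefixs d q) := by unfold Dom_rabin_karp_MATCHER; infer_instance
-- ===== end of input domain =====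

-- B replaces A's per-pattern Rabin–Karp rolling-hash scan by a direct scan anchored on
-- each pattern's first character (objective: simpler); d and q are unused by B.

-- ===== PORT A =====
-- ord(c); exact for every Char
def pvOrd (c : Char) : Int := (c.toNat : Int)

-- the body of A's outer 'for pat in ArrPrefixs' loop, acting on the running total
def rkPat (tl : List Char) (d q : Int) (total : Int) (pl : List Char) : Int :=
  let D := d
  let M : Int := (pl.length : Int)
  -- pow(d, M-1) % q; (M-1).toNat is exact for M ≥ 1 (Pre_ excludes empty patterns,
  -- where Python computes a float hash)
  let h := PySem.Int.mod (d ^ (M - 1).toNat) q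
  let N : Int := (tl.length : Int)
  -- for i in range(M): p = (d*p + ord(pat[i])) % q ; t = (d*t + ord(texto[i])) % q
  let pt := (PySem.List.pyRange 0 M 1).foldl
      (fun (pt : Int × Int) i =>
        (PySem.Int.mod (d * pt.1 + pvOrd (PySem.List.pyGetD pl i ' ')) q,
         PySem.Int.mod (d * pt.2 + pvOrd (PySem.List.pyGetD tl i ' ')) q)) (0, 0)
  let p := pt.1
  -- for s in range(N-M+1): …
  let res := (PySem.List.pyRange 0 (N - M + 1) 1).foldl
      (fun (st : Int × Int) s =>
        let tot := if p = st.2 ∧ pl = PySem.List.slice tl (some s) (some (s + M))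
                   then st.1 + 1 else st.1
        let t' := if s < N - M then
            let t1 := PySem.Int.mod
              (D * (st.2 - pvOrd (PySem.List.pyGetD tl s ' ') * h)
                 + pvOrd (PySem.List.pyGetD tl (s + M) ' ')) q
            if t1 < 0 then t1 + q else t1
          else st.2
        (tot, t')) (total, pt.2)
  res.1

def rabin_karp_MATCHER (texto : String) (ArrPrefixs : List String) (d : Int) (q : Int) : Int :=
  ArrPrefixs.foldl (fun total pat => rkPat texto.toList d q total pat.toList) 0

-- ===== PORT B =====
def rabin_karp_MATCHER_alt (texto : String) (ArrPrefixs : List String) (d : Int) (q : Int) : Int :=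
  let tl := texto.toList
  let N : Int := (tl.length : Int)
  ArrPrefixs.foldl (fun total pat =>
    let pl := pat.toList
    -- c0 = pat[0]; Python raises IndexError on an empty pattern, which Pre_ excludes
    let c0 := PySem.List.pyGetD pl 0 ' '
    let M : Int := (pl.length : Int)
    (PySem.List.pyRange 0 (N - M + 1) 1).foldl (fun tot s =>
      if PySem.List.pyGetD tl s ' ' = c0 ∧ PySem.List.slice tl (some s) (some (s + M)) = pl
      then tot + 1 else tot) total) 0

-- ===== PRECONDITION & SPEC =====
-- Pre_ excludes q = 0 with a nonempty pattern list (ZeroDivisionError; with no patterns A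
-- never touches q and returns 0), patterns longer than texto (IndexError in the
-- preprocessing loop), and empty patterns, on which A still returns but its hash
-- h = pow(d, -1) is a Python float, so the count is an artefact of the platform's float
-- rounding (and B's pat[0] anchor raises IndexError there).
def Pre_rabin_karp_MATCHER (texto : String) (ArrPrefixs : List String) (d : Int) (q : Int) : Prop :=
  (ArrPrefixs = [] ∨ q ≠ 0) ∧
    ∀ p ∈ ArrPrefixs, p.toList ≠ [] ∧ p.toList.length ≤ texto.toList.length

instance (texto : String) (ArrPrefixs : List String) (d : Int) (q : Int) : Decidable (Pre_rabin_karp_MATCHER texto ArrPrefixs d q) := by unfold Pre_rabin_karp_MATCHER; infer_instance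

def pvWitness_rabin_karp_MATCHER : String × List String × Int × Int := ("abab", ["ab", "b"], 256, 101)

-- On q = 0 with a nonempty pattern list, and on patterns longer than texto, A raises
-- (ZeroDivisionError resp. IndexError) while B returns the plain occurrence count.
def Raises_rabin_karp_MATCHER (texto : String) (ArrPrefixs : List String) (d : Int) (q : Int) : Prop :=
  (∀ p ∈ ArrPrefixs, p.toList ≠ []) ∧
    ((ArrPrefixs ≠ [] ∧ q = 0) ∨ ∃ p ∈ ArrPrefixs, texto.toList.length < p.toList.length)

instance (texto : String) (ArrPrefixs : List String) (d : Int) (q : Int) : Decidable (Raises_rabin_karp_MATCHER texto ArrPrefixs d q) := by unfold Raises_rabin_karp_MATCHER; infer_instance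

def pvRaiseWitness_rabin_karp_MATCHER : String × List String × Int × Int := ("ab", ["abc"], 256, 7)
def pvRaiseWitnessOut_rabin_karp_MATCHER : Int := 0

-- a pattern's un-reduced polynomial hash (only used to state D_ and in the proofs)
def rkPoly (d : Int) (l : List Char) (a : Int) : Int :=
  l.foldl (fun a c => d * a + pvOrd c) a

-- On q < 0 with some pattern whose hash q does not divide occurring in the text at a start
-- position ≥ 1, A returns an undercount (its 't = t+q' fix-up pushes the rolling hash below
-- Python's canonical residue range for a negative modulus, so the hash test misses exactly
-- those matches), while B returns the true occurrence count, the intended value.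
def D_rabin_karp_MATCHER (texto : String) (ArrPrefixs : List String) (d : Int) (q : Int) : Prop :=
  q < 0 ∧ ∃ p ∈ ArrPrefixs, ¬ q ∣ rkPoly d p.toList 0 ∧ p.toList <:+: texto.toList.drop 1

instance (texto : String) (ArrPrefixs : List String) (d : Int) (q : Int) : Decidable (D_rabin_karp_MATCHER texto ArrPrefixs d q) := by unfold D_rabin_karp_MATCHER; infer_instance

def Spec_rabin_karp_MATCHER (texto : String) (ArrPrefixs : List String) (d : Int) (q : Int) (out : Int) : Prop := ¬ D_rabin_karp_MATCHER texto ArrPrefixs d q → out = rabin_karp_MATCHER_alt texto ArrPrefixs d q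
instance (texto : String) (ArrPrefixs : List String) (d : Int) (q : Int) (out : Int) : Decidable (Spec_rabin_karp_MATCHER texto ArrPrefixs d q out) := by unfold Spec_rabin_karp_MATCHER; infer_instance

def pvDiffWitness_rabin_karp_MATCHER : String × List String × Int × Int := ("abab", ["ab"], 256, -7)
def pvDiffWitnessOut_rabin_karp_MATCHER : Int × Int := (1, 2)

-- ===== CLAIM (what is proved, stated in full; the proofs are below) =====
def Claim_unchanged_rabin_karp_MATCHER : Prop := ∀ (texto : String) (ArrPrefixs : List String) (d : Int) (q : Int), Dom_rabin_karp_MATCHER texto ArrPrefixs d q → Pre_rabin_karp_MATCHER texto ArrPrefixs d q → Spec_rabin_karp_MATCHER texto ArrPrefixs d q (rabin_karp_MATCHER texto ArrPrefixs d q)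
def Claim_changed_rabin_karp_MATCHER : Prop := Dom_rabin_karp_MATCHER (pvDiffWitness_rabin_karp_MATCHER.1) (pvDiffWitness_rabin_karp_MATCHER.2.1) (pvDiffWitness_rabin_karp_MATCHER.2.2.1) (pvDiffWitness_rabin_karp_MATCHER.2.2.2) ∧ Pre_rabin_karp_MATCHER (pvDiffWitness_rabin_karp_MATCHER.1) (pvDiffWitness_rabin_karp_MATCHER.2.1) (pvDiffWitness_rabin_karp_MATCHER.2.2.1) (pvDiffWitness_rabin_karp_MATCHER.2.2.2) ∧ D_rabin_karp_MATCHER (pvDiffWitness_rabin_karp_MATCHER.1) (pvDiffWitness_rabin_karp_MATCHER.2.1) (pvDiffWitness_rabin_karp_MATCHER.2.2.1) (pvDiffWitness_rabin_karp_MATCHER.2.2.2) ∧ rabin_karp_MATCHER (pvDiffWitness_rabin_karp_MATCHER.1) (pvDiffWitness_rabin_karp_MATCHER.2.1) (pvDiffWitness_rabin_karp_MATCHER.2.2.1) (pvDiffWitness_rabin_karp_MATCHER.2.2.2) = pvDiffWitnessOut_rabin_karp_MATCHER.1 ∧ rabin_karp_MATCHER_alt (pvDiffWitness_rabin_karp_MATCHER.1)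 (pvDiffWitness_rabin_karp_MATCHER.2.1) (pvDiffWitness_rabin_karp_MATCHER.2.2.1) (pvDiffWitness_rabin_karp_MATCHER.2.2.2) = pvDiffWitnessOut_rabin_karp_MATCHER.2 ∧ pvDiffWitnessOut_rabin_karp_MATCHER.1 ≠ pvDiffWitnessOut_rabin_karp_MATCHER.2

def Claim_exact_rabin_karp_MATCHER : Prop := ∀ (texto : String) (ArrPrefixs : List String) (d : Int) (q : Int), Dom_rabin_karp_MATCHER texto ArrPrefixs d q → Pre_rabin_karp_MATCHER texto ArrPrefixs d q → D_rabin_karp_MATCHER texto ArrPrefixs d q → rabin_karp_MATCHER texto ArrPrefixs d q ≠ rabin_karp_MATCHER_alt texto ArrPrefixs d q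
def Claim_raises_rabin_karp_MATCHER : Prop := (∀ (texto : String) (ArrPrefixs : List String) (d : Int) (q : Int), Dom_rabin_karp_MATCHER texto ArrPrefixs d q → Raises_rabin_karp_MATCHER texto ArrPrefixs d q → ¬ Pre_rabin_karp_MATCHER texto ArrPrefixs d q) ∧ (Dom_rabin_karp_MATCHER (pvRaiseWitness_rabin_karp_MATCHER.1) (pvRaiseWitness_rabin_karp_MATCHER.2.1) (pvRaiseWitness_rabin_karp_MATCHER.2.2.1) (pvRaiseWitness_rabin_karp_MATCHER.2.2.2) ∧ Raises_rabin_karp_MATCHER (pvRaiseWitness_rabin_karp_MATCHER.1) (pvRaiseWitness_rabin_karp_MATCHER.2.1) (pvRaiseWitness_rabin_karp_MATCHER.2.2.1) (pvRaiseWitness_rabin_karp_MATCHER.2.2.2) ∧ rabin_karp_MATCHER_alt (pvRaiseWitness_rabin_karp_MATCHER.1) (pvRaiseWitness_rabin_karp_MATCHER.2.1) (pvRaiseWitness_rabin_karp_MATCHER.2.2.1) (pvRaiseWitness_rabin_karp_MATCHER.2.2.2) = pvRaiseWitnessOut_rabin_karp_MATCHER)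

-- ===== LEMMAS AND PROOFS =====

-- the reduced hash A actually computes
def rkHash (d q : Int) (l : List Char) (a : Int) : Int :=
  l.foldl (fun a c => PySem.Int.mod (d * a + pvOrd c) q) a

-- generic: a fold of a pair of independent accumulators splits componentwise
lemma rk_foldl_pair (l : List Int) (f g : Int → Int → Int) (a b : Int) :
    l.foldl (fun (p : Int × Int) x => (f p.1 x, g p.2 x)) (a, b) = (l.foldl f a, l.foldl g b) := by
  induction l generalizing a b with
  | nil => rfl
  | cons x t ih => simpa using ih (f a x) (g b x)

lemma rkPoly_cons (d : Int) (c : Char) (l : List Char) (a : Int) :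
    rkPoly d (c :: l) a = rkPoly d l (d * a + pvOrd c) := rfl

lemma rkHash_cons (d q : Int) (c : Char) (l : List Char) (a : Int) :
    rkHash d q (c :: l) a = rkHash d q l (PySem.Int.mod (d * a + pvOrd c) q) := rfl

lemma rkPoly_append (d : Int) (l : List Char) (c : Char) (a : Int) :
    rkPoly d (l ++ [c]) a = d * rkPoly d l a + pvOrd c := by
  simp [rkPoly, List.foldl_append]

lemma rkPoly_shift (d : Int) (l : List Char) : ∀ a : Int,
    rkPoly d l a = a * d ^ l.length + rkPoly d l 0 := by
  induction l with
  | nil => intro a; simp [rkPoly]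
  | cons c t ih =>
    intro a
    rw [rkPoly_cons, ih, rkPoly_cons d c t 0, ih (d * 0 + pvOrd c)]
    simp [pow_succ]; ring

lemma rkPoly_modCongr (d q : Int) (l : List Char) : ∀ a b : Int, a % q = b % q →
    rkPoly d l a % q = rkPoly d l b % q := by
  induction l with
  | nil => intro a b h; simpa [rkPoly] using h
  | cons c t ih =>
    intro a b h
    rw [rkPoly_cons, rkPoly_cons]
    exact ih _ _ ((Int.ModEq.mul_left d h).add_right _)

lemma rkHash_cons_eq_mod (d q : Int) (hq : 0 < q) : ∀ (l : List Char) (c : Char) (a : Int),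
    rkHash d q (c :: l) a = rkPoly d (c :: l) a % q := by
  intro l
  induction l with
  | nil => intro c a; simp [rkHash, rkPoly, PySem.Int.mod_eq_emod_of_pos hq]
  | cons c' t ih =>
    intro c a
    rw [rkHash_cons, ih, rkPoly_cons d c (c' :: t) a]
    exact rkPoly_modCongr d q (c' :: t) _ _
      (by rw [PySem.Int.mod_eq_emod_of_pos hq]; exact Int.emod_emod_of_dvd _ dvd_rfl)

lemma rkHash_eq_mod (d q : Int) (hq : 0 < q) (l : List Char) (hl : l ≠ []) (a : Int) :
    rkHash d q l a = rkPoly d l a % q := by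
  cases l with
  | nil => exact absurd rfl hl
  | cons c t => exact rkHash_cons_eq_mod d q hq t c a

-- the rolling-hash update of A is exact modulo a positive q
lemma rk_rolling (d q : Int) (hq : 0 < q) (c0 cM : Char) (mid : List Char) :
    PySem.Int.mod (d * (rkPoly d (c0 :: mid) 0 % q
        - pvOrd c0 * PySem.Int.mod (d ^ mid.length) q) + pvOrd cM) q
      = rkPoly d (mid ++ [cM]) 0 % q := by
  rw [PySem.Int.mod_eq_emod_of_pos hq, PySem.Int.mod_eq_emod_of_pos hq]
  have h1 : rkPoly d (c0 :: mid) 0 = pvOrd c0 * d ^ mid.length + rkPoly d mid 0 := by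
    rw [rkPoly_cons, rkPoly_shift]; ring
  have h3 : d * (rkPoly d (c0 :: mid) 0 - pvOrd c0 * d ^ mid.length) + pvOrd cM
      = rkPoly d (mid ++ [cM]) 0 := by
    rw [h1, rkPoly_append]; ring
  have e1 : rkPoly d (c0 :: mid) 0 % q ≡ rkPoly d (c0 :: mid) 0 [ZMOD q] :=
    Int.emod_emod_of_dvd _ dvd_rfl
  have e2 : d ^ mid.length % q ≡ d ^ mid.length [ZMOD q] :=
    Int.emod_emod_of_dvd _ dvd_rfl
  have hm := ((e1.sub (e2.mul_left (pvOrd c0))).mul_left d).add_right (pvOrd cM)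
  rw [← h3]
  exact hm

-- preprocessing loop: computes the reduced hashes of the pattern and of the first window
lemma rk_pre (tl pl : List Char) (d q : Int) (hMN : pl.length ≤ tl.length) :
    (PySem.List.pyRange 0 (pl.length : Int) 1).foldl
      (fun (pt : Int × Int) i =>
        (PySem.Int.mod (d * pt.1 + pvOrd (PySem.List.pyGetD pl i ' ')) q,
         PySem.Int.mod (d * pt.2 + pvOrd (PySem.List.pyGetD tl i ' ')) q)) (0, 0)
    = (rkHash d q pl 0, rkHash d q (tl.take pl.length) 0) := by
  rw [rk_foldl_pair _ (fun a i => PySem.Int.mod (d * a + pvOrd (PySem.List.pyGetD pl i ' ')) q)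
        (fun a i => PySem.Int.mod (d * a + pvOrd (PySem.List.pyGetD tl i ' ')) q)]
  have hlen : (tl.take pl.length).length = pl.length := by
    simp [List.length_take]; omega
  have h1 : (PySem.List.pyRange 0 (pl.length : Int) 1).foldl
      (fun a i => PySem.Int.mod (d * a + pvOrd (PySem.List.pyGetD pl i ' ')) q) 0
      = rkHash d q pl 0 :=
    PySem.List.foldl_pyRange_zero_pyGetD' pl ' '
      (fun a c => PySem.Int.mod (d * a + pvOrd c) q) 0
  have hcg : (PySem.List.pyRange 0 (pl.length : Int) 1).foldl
      (fun a i => PySem.Int.mod (d * a + pvOrd (PySem.List.pyGetD tl i ' ')) q) 0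
      = (PySem.List.pyRange 0 (pl.length : Int) 1).foldl
      (fun a i => PySem.Int.mod (d * a + pvOrd (PySem.List.pyGetD (tl.take pl.length) i ' ')) q) 0 := by
    apply PySem.List.foldl_congr_mem
    intro a i hi
    rcases (PySem.List.mem_pyRange_one).1 hi with ⟨h0, h1⟩
    have hi1 : i < ((tl.take pl.length).length : Int) := by rw [hlen]; exact h1
    have hi2 : i < (tl.length : Int) := by
      have := Int.ofNat_le.2 hMN; omega
    rw [PySem.List.pyGetD_eq_getElem tl ' ' h0 hi2,
        PySem.List.pyGetD_eq_getElem (List.take pl.length tl) ' ' h0 hi1,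
        List.getElem_take]
  have h2 : (PySem.List.pyRange 0 (pl.length : Int) 1).foldl
      (fun a i => PySem.Int.mod (d * a + pvOrd (PySem.List.pyGetD (tl.take pl.length) i ' ')) q) 0
      = rkHash d q (tl.take pl.length) 0 := by
    have := PySem.List.foldl_pyRange_zero_pyGetD' (tl.take pl.length) ' '
      (fun a c => PySem.Int.mod (d * a + pvOrd c) q) 0
    rwa [hlen] at this
  rw [h1, hcg, h2]

-- for a positive q, the scanning loop of A counts exactly the start positions whose
-- slice equals the pattern
lemma rk_loop (tl pl : List Char) (d q : Int) (hq : 0 < q) (hpl : pl ≠ [])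
    (hMN : pl.length ≤ tl.length) :
    ∀ (j s : Nat) (tot : Int), s + j = tl.length - pl.length + 1 →
    (List.foldl
      (fun (st : Int × Int) x =>
        (if rkHash d q pl 0 = st.2 ∧ pl = PySem.List.slice tl (some x) (some (x + (pl.length : Int)))
         then st.1 + 1 else st.1,
         if x < (tl.length : Int) - (pl.length : Int) then
           if PySem.Int.mod (d * (st.2 - pvOrd (PySem.List.pyGetD tl x ' ')
                  * PySem.Int.mod (d ^ ((pl.length : Int) - 1).toNat) q)
                + pvOrd (PySem.List.pyGetD tl (x + (pl.length : Int)) ' ')) q < 0 then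
             PySem.Int.mod (d * (st.2 - pvOrd (PySem.List.pyGetD tl x ' ')
                  * PySem.Int.mod (d ^ ((pl.length : Int) - 1).toNat) q)
                + pvOrd (PySem.List.pyGetD tl (x + (pl.length : Int)) ' ')) q + q
           else
             PySem.Int.mod (d * (st.2 - pvOrd (PySem.List.pyGetD tl x ' ')
                  * PySem.Int.mod (d ^ ((pl.length : Int) - 1).toNat) q)
                + pvOrd (PySem.List.pyGetD tl (x + (pl.length : Int)) ' ')) q
         else st.2))
      (tot, rkHash d q ((tl.drop s).take pl.length) 0)
      (PySem.List.pyRange (s : Int) ((tl.length : Int) - (pl.length : Int) + 1) 1)).1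
    = tot + (((PySem.List.pyRange (s : Int) ((tl.length : Int) - (pl.length : Int) + 1) 1).countP
        (fun x => PySem.List.slice tl (some x) (some (x + (pl.length : Int))) == pl)) : Int) := by
  intro j
  induction j with
  | zero =>
    intro s tot hs
    have : ((tl.length : Int) - (pl.length : Int) + 1) ≤ (s : Int) := by omega
    rw [PySem.List.pyRange_one_eq_nil this]
    simp
  | succ j ih =>
    intro s tot hs
    have hM1 : 0 < pl.length := List.length_pos_of_ne_nil hpl
    have hsN : s + pl.length ≤ tl.length := by omega
    have hlt : (s : Int) < (tl.length : Int) - (pl.length : Int) + 1 := by omega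
    rw [PySem.List.pyRange_one_cons hlt, List.foldl_cons, List.countP_cons]
    have hslice : PySem.List.slice tl (some (s : Int)) (some ((s : Int) + (pl.length : Int)))
        = (tl.drop s).take pl.length := PySem.List.slice_natCast_add tl s pl.length
    have hs1 : s < tl.length := by omega
    -- the counting component of one step
    have hfst : ∀ tt : Int,
        (if rkHash d q pl 0 = rkHash d q ((tl.drop s).take pl.length) 0 ∧
            pl = PySem.List.slice tl (some (s : Int)) (some ((s : Int) + (pl.length : Int)))
         then tt + 1 else tt)
        = tt + (if (PySem.List.slice tl (some (s : Int)) (some ((s : Int) + (pl.length : Int))) == pl)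
                then (1 : Int) else 0) := by
      intro tt
      rw [hslice]
      by_cases hpw : pl = (tl.drop s).take pl.length
      · rw [if_pos ⟨congrArg (fun l => rkHash d q l 0) hpw, hpw⟩, if_pos (by simp [hpw.symm])]
      · rw [if_neg (fun h => hpw h.2), if_neg (by simp [beq_iff_eq]; exact fun h => hpw h.symm), add_zero]
    by_cases hj0 : j = 0
    · -- last iteration: the remaining range is empty
      subst hj0
      have hend : ((tl.length : Int) - (pl.length : Int) + 1) ≤ (s : Int) + 1 := by omega
      rw [PySem.List.pyRange_one_eq_nil hend]
      simp only [List.foldl_nil, List.countP_nil, Nat.zero_add]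
      rw [hfst tot]
      by_cases hb : (PySem.List.slice tl (some (s : Int)) (some ((s : Int) + (pl.length : Int))) == pl) = true
      · simp [hb]
      · simp [hb]
    · -- the rolling update produces the hash of the next window
      have hlt2 : (s : Int) < (tl.length : Int) - (pl.length : Int) := by omega
      have hs2 : s + pl.length < tl.length := by omega
      have hgs : PySem.List.pyGetD tl (s : Int) ' ' = tl[s] := by
        rw [PySem.List.pyGetD_natCast]; exact List.getD_eq_getElem tl ' ' hs1
      have hgsM : PySem.List.pyGetD tl ((s : Int) + (pl.length : Int)) ' ' = tl[s + pl.length] := by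
        rw [← Nat.cast_add, PySem.List.pyGetD_natCast]
        exact List.getD_eq_getElem tl ' ' hs2
      have hwdecomp : (tl.drop s).take pl.length
          = tl[s] :: (tl.drop (s + 1)).take (pl.length - 1) := by
        rw [List.drop_eq_getElem_cons hs1]
        conv_lhs => rw [show pl.length = (pl.length - 1) + 1 by omega]
        rw [List.take_succ_cons]
      have hmidlen : ((tl.drop (s + 1)).take (pl.length - 1)).length = pl.length - 1 := by
        simp [List.length_take, List.length_drop]; omega
      have hidx : s + 1 + (pl.length - 1) = s + pl.length := by omega
      have hdroplen : pl.length - 1 < (tl.drop (s + 1)).length := by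
        simp [List.length_drop]; omega
      have hmid_eq : (tl.drop (s + 1)).take pl.length
          = (tl.drop (s + 1)).take (pl.length - 1) ++ [tl[s + pl.length]] := by
        conv_lhs => rw [show pl.length = (pl.length - 1) + 1 by omega]
        rw [List.take_add_one, List.getElem?_eq_getElem hdroplen]
        simp [List.getElem_drop, hidx]
      have hexp : (((pl.length : Int) - 1).toNat) = pl.length - 1 := by omega
      have ht1 : PySem.Int.mod (d * (rkHash d q ((tl.drop s).take pl.length) 0
              - pvOrd (PySem.List.pyGetD tl (s : Int) ' ')
                * PySem.Int.mod (d ^ (((pl.length : Int) - 1).toNat)) q)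
            + pvOrd (PySem.List.pyGetD tl ((s : Int) + (pl.length : Int)) ' ')) q
          = rkHash d q ((tl.drop (s + 1)).take pl.length) 0 := by
        have hne : (tl.drop (s + 1)).take pl.length ≠ [] := by
          rw [hmid_eq]; simp
        have hroll := rk_rolling d q hq (tl[s]) (tl[s + pl.length])
          ((tl.drop (s + 1)).take (pl.length - 1))
        rw [hmidlen] at hroll
        rw [hgs, hgsM, hexp, hwdecomp, rkHash_cons_eq_mod d q hq, hroll, ← hmid_eq,
            rkHash_eq_mod d q hq ((tl.drop (s + 1)).take pl.length) hne]
      have hnonneg := PySem.Int.mod_nonneg (d * (rkHash d q ((tl.drop s).take pl.length) 0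
              - pvOrd (PySem.List.pyGetD tl (s : Int) ' ')
                * PySem.Int.mod (d ^ (((pl.length : Int) - 1).toNat)) q)
            + pvOrd (PySem.List.pyGetD tl ((s : Int) + (pl.length : Int)) ' ')) hq
      have ihs := ih (s + 1) (tot + (if (PySem.List.slice tl (some (s : Int))
            (some ((s : Int) + (pl.length : Int))) == pl) then (1 : Int) else 0)) (by omega)
      push_cast at ihs
      simp only [hfst, if_pos hlt2, ht1]
      have hnonneg' : (0 : Int) ≤ rkHash d q ((tl.drop (s + 1)).take pl.length) 0 := by
        rw [← ht1]; exact hnonneg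
      rw [if_neg (not_lt.mpr hnonneg'), ihs]
      by_cases hb : (PySem.List.slice tl (some (s : Int)) (some ((s : Int) + (pl.length : Int))) == pl) = true
      · simp [hb]; ring
      · simp [hb]

-- one pattern of the outer loop, q > 0: A's Rabin–Karp pass counts the matching slices
lemma rkPat_eq (tl pl : List Char) (d q tot : Int) (hq : 0 < q) (hpl : pl ≠ [])
    (hMN : pl.length ≤ tl.length) :
    rkPat tl d q tot pl
      = tot + (((PySem.List.pyRange 0 ((tl.length : Int) - (pl.length : Int) + 1) 1).countP
          (fun x => PySem.List.slice tl (some x) (some (x + (pl.length : Int))) == pl)) : Int) := by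
  simp only [rkPat]
  rw [rk_pre tl pl d q hMN]
  have hl := rk_loop tl pl d q hq hpl hMN (tl.length - pl.length + 1) 0 tot (by omega)
  simp only [Nat.cast_zero, List.drop_zero] at hl
  exact hl


-- Python's % is a class function modulo q
lemma pymod_modEq (a q : Int) : Int.ModEq q (PySem.Int.mod a q) a := by
  have h := PySem.Int.floordiv_mul_add_mod a q
  exact Int.modEq_iff_dvd.mpr ⟨PySem.Int.floordiv a q, by linear_combination - h⟩

lemma pymod_eq_of_modEq {q a b : Int} (hq : q ≠ 0) (h : Int.ModEq q a b) :
    PySem.Int.mod a q = PySem.Int.mod b q := by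
  have h1 : Int.ModEq q (PySem.Int.mod a q) (PySem.Int.mod b q) :=
    (pymod_modEq a q).trans (h.trans (pymod_modEq b q).symm)
  rcases h1.dvd with ⟨k, hk⟩
  rcases lt_or_gt_of_ne hq with hq' | hq'
  · have b1 := PySem.Int.mod_neg_bounds (a := a) hq'
    have b2 := PySem.Int.mod_neg_bounds (a := b) hq'
    have hk0 : k = 0 := by nlinarith
    rw [hk0, mul_zero] at hk
    omega
  · have b1l := PySem.Int.mod_nonneg a hq'
    have b1u := PySem.Int.mod_lt a hq'
    have b2l := PySem.Int.mod_nonneg b hq'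
    have b2u := PySem.Int.mod_lt b hq'
    have hk0 : k = 0 := by nlinarith
    rw [hk0, mul_zero] at hk
    omega

lemma rkPoly_modEq (d q : Int) (l : List Char) : ∀ a b : Int, Int.ModEq q a b →
    Int.ModEq q (rkPoly d l a) (rkPoly d l b) := by
  induction l with
  | nil => intro a b h; exact h
  | cons c t ih =>
    intro a b h
    rw [rkPoly_cons, rkPoly_cons]
    exact ih _ _ ((h.mul_left d).add_right _)

-- the reduced hash is Python's % of the polynomial hash, for every q ≠ 0
lemma rkHash_eq_pymod (d q : Int) (hq : q ≠ 0) : ∀ (l : List Char) (c : Char) (a : Int),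
    rkHash d q (c :: l) a = PySem.Int.mod (rkPoly d (c :: l) a) q := by
  intro l
  induction l with
  | nil => intro c a; simp [rkHash, rkPoly]
  | cons c' t ih =>
    intro c a
    rw [rkHash_cons, ih, rkPoly_cons d c (c' :: t) a]
    exact pymod_eq_of_modEq hq
      (rkPoly_modEq d q (c' :: t) _ _ (pymod_modEq (d * a + pvOrd c) q))

-- the rolling update, as a congruence (any q, any t in the window hash's class)
lemma rk_rolling_modEq (d q : Int) (c0 cM : Char) (mid : List Char) (t : Int)
    (ht : Int.ModEq q t (rkPoly d (c0 :: mid) 0)) :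
    Int.ModEq q (d * (t - pvOrd c0 * PySem.Int.mod (d ^ mid.length) q) + pvOrd cM)
      (rkPoly d (mid ++ [cM]) 0) := by
  have h1 : rkPoly d (c0 :: mid) 0 = pvOrd c0 * d ^ mid.length + rkPoly d mid 0 := by
    rw [rkPoly_cons, rkPoly_shift]; ring
  have h3 : d * (rkPoly d (c0 :: mid) 0 - pvOrd c0 * d ^ mid.length) + pvOrd cM
      = rkPoly d (mid ++ [cM]) 0 := by
    rw [h1, rkPoly_append]; ring
  exact h3 ▸ (((ht.sub ((pymod_modEq (d ^ mid.length) q).mul_left (pvOrd c0))).mul_left d).add_right (pvOrd cM))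

-- a value of t's invariant range that q divides is 0
lemma rk_inrange_dvd_zero {q t : Int} (hq : q < 0) (ht : t = 0 ∨ (2 * q < t ∧ t < q))
    (hd : q ∣ t) : t = 0 := by
  rcases ht with h | ⟨h1, h2⟩
  · exact h
  · rcases hd with ⟨k, rfl⟩
    have hk1 : 1 < k := by nlinarith
    have hk2 : k < 2 := by nlinarith
    omega

-- the scanning loop for q < 0 from any position ≥ 1: the fix-up keeps t out of the
-- canonical range, so a match is counted iff q divides the pattern's polynomial hash
lemma rk_loop_neg (tl pl : List Char) (d q : Int) (hq : q < 0) (hpl : pl ≠ [])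
    (hMN : pl.length ≤ tl.length) :
    ∀ (j s : Nat) (tot t : Int), 1 ≤ s → s + j = tl.length - pl.length + 1 →
    Int.ModEq q t (rkPoly d ((tl.drop s).take pl.length) 0) →
    (t = 0 ∨ (2 * q < t ∧ t < q)) →
    (List.foldl
      (fun (st : Int × Int) x =>
        (if rkHash d q pl 0 = st.2 ∧ pl = PySem.List.slice tl (some x) (some (x + (pl.length : Int)))
         then st.1 + 1 else st.1,
         if x < (tl.length : Int) - (pl.length : Int) then
           if PySem.Int.mod (d * (st.2 - pvOrd (PySem.List.pyGetD tl x ' ')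
                  * PySem.Int.mod (d ^ ((pl.length : Int) - 1).toNat) q)
                + pvOrd (PySem.List.pyGetD tl (x + (pl.length : Int)) ' ')) q < 0 then
             PySem.Int.mod (d * (st.2 - pvOrd (PySem.List.pyGetD tl x ' ')
                  * PySem.Int.mod (d ^ ((pl.length : Int) - 1).toNat) q)
                + pvOrd (PySem.List.pyGetD tl (x + (pl.length : Int)) ' ')) q + q
           else
             PySem.Int.mod (d * (st.2 - pvOrd (PySem.List.pyGetD tl x ' ')
                  * PySem.Int.mod (d ^ ((pl.length : Int) - 1).toNat) q)
                + pvOrd (PySem.List.pyGetD tl (x + (pl.length : Int)) ' ')) q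
         else st.2))
      (tot, t)
      (PySem.List.pyRange (s : Int) ((tl.length : Int) - (pl.length : Int) + 1) 1)).1
    = tot + (if q ∣ rkPoly d pl 0 then
        (((PySem.List.pyRange (s : Int) ((tl.length : Int) - (pl.length : Int) + 1) 1).countP
          (fun x => PySem.List.slice tl (some x) (some (x + (pl.length : Int))) == pl)) : Int)
      else 0) := by
  intro j
  induction j with
  | zero =>
    intro s tot t _ hs _ _
    rw [PySem.List.pyRange_one_eq_nil (by omega), List.foldl_nil, List.countP_nil]
    simp
  | succ j ih =>
    intro s tot t h1 hs hmeq hrange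
    have hM1 : 0 < pl.length := List.length_pos_of_ne_nil hpl
    have hsN : s + pl.length ≤ tl.length := by omega
    have hlt : (s : Int) < (tl.length : Int) - (pl.length : Int) + 1 := by omega
    have hs1 : s < tl.length := by omega
    rw [PySem.List.pyRange_one_cons hlt, List.foldl_cons, List.countP_cons]
    have hslice : PySem.List.slice tl (some (s : Int)) (some ((s : Int) + (pl.length : Int)))
        = (tl.drop s).take pl.length := PySem.List.slice_natCast_add tl s pl.length
    -- the counting component of this step
    have hfst : ∀ tt : Int,
        (if rkHash d q pl 0 = t ∧
            pl = PySem.List.slice tl (some (s : Int)) (some ((s : Int) + (pl.length : Int)))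
         then tt + 1 else tt)
        = tt + (if q ∣ rkPoly d pl 0 then
            (if (PySem.List.slice tl (some (s : Int)) (some ((s : Int) + (pl.length : Int))) == pl)
             then (1 : Int) else 0) else 0) := by
      intro tt
      rw [hslice]
      by_cases hpw : pl = (tl.drop s).take pl.length
      · have hph : rkHash d q pl 0 = PySem.Int.mod (rkPoly d pl 0) q := by
          cases pl with
          | nil => exact absurd rfl hpl
          | cons c l => exact rkHash_eq_pymod d q (by omega) l c 0
        have hmeq' : Int.ModEq q t (rkPoly d pl 0) := by rw [hpw]; exact hmeq
        by_cases hdvd : q ∣ rkPoly d pl 0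
        · have hp0 : rkHash d q pl 0 = 0 := by
            rw [hph]; exact (PySem.Int.mod_eq_zero_iff_dvd _ _).mpr hdvd
          have ht0 : t = 0 := rk_inrange_dvd_zero hq hrange
            (Int.modEq_zero_iff_dvd.mp (hmeq'.trans (Int.modEq_zero_iff_dvd.mpr hdvd)))
          rw [if_pos ⟨by rw [hp0, ht0], hpw⟩, if_pos hdvd, if_pos (by simp [hpw.symm])]
        · have hpne : rkHash d q pl 0 ≠ t := by
            have hb := PySem.Int.mod_neg_bounds (a := rkPoly d pl 0) hq
            have hpz : rkHash d q pl 0 ≠ 0 := by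
              rw [hph]
              exact fun h => hdvd ((PySem.Int.mod_eq_zero_iff_dvd _ _).mp h)
            intro hcontra
            rcases hrange with ht0 | ⟨hl, hr⟩
            · exact hpz (hcontra.trans ht0)
            · rw [hph] at hcontra; omega
          rw [if_neg (fun h => hpne h.1), if_neg hdvd, add_zero]
      · rw [if_neg (fun h => hpw h.2)]
        have hb2 : (PySem.List.slice tl (some (s : Int))
            (some ((s : Int) + (pl.length : Int))) == pl) = false := by
          rw [hslice]
          exact beq_eq_false_iff_ne.mpr (fun h => hpw h.symm)
        rw [hslice] at hb2
        simp [hb2]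
    by_cases hj0 : j = 0
    · subst hj0
      have hend : ((tl.length : Int) - (pl.length : Int) + 1) ≤ (s : Int) + 1 := by omega
      rw [PySem.List.pyRange_one_eq_nil hend]
      simp only [List.foldl_nil, List.countP_nil, Nat.zero_add]
      rw [hfst tot]
      by_cases hdvd : q ∣ rkPoly d pl 0
      · simp [hdvd]
      · simp [hdvd]
    · -- the rolling update: stays in t's class and in the shifted range
      have hlt2 : (s : Int) < (tl.length : Int) - (pl.length : Int) := by omega
      have hs2 : s + pl.length < tl.length := by omega
      have hgs : PySem.List.pyGetD tl (s : Int) ' ' = tl[s] := by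
        rw [PySem.List.pyGetD_natCast]; exact List.getD_eq_getElem tl ' ' hs1
      have hgsM : PySem.List.pyGetD tl ((s : Int) + (pl.length : Int)) ' ' = tl[s + pl.length] := by
        rw [← Nat.cast_add, PySem.List.pyGetD_natCast]
        exact List.getD_eq_getElem tl ' ' hs2
      have hwdecomp : (tl.drop s).take pl.length
          = tl[s] :: (tl.drop (s + 1)).take (pl.length - 1) := by
        rw [List.drop_eq_getElem_cons hs1]
        conv_lhs => rw [show pl.length = (pl.length - 1) + 1 by omega]
        rw [List.take_succ_cons]
      have hmidlen : ((tl.drop (s + 1)).take (pl.length - 1)).length = pl.length - 1 := by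
        simp [List.length_take, List.length_drop]; omega
      have hidx : s + 1 + (pl.length - 1) = s + pl.length := by omega
      have hdroplen : pl.length - 1 < (tl.drop (s + 1)).length := by
        simp [List.length_drop]; omega
      have hmid_eq : (tl.drop (s + 1)).take pl.length
          = (tl.drop (s + 1)).take (pl.length - 1) ++ [tl[s + pl.length]] := by
        conv_lhs => rw [show pl.length = (pl.length - 1) + 1 by omega]
        rw [List.take_add_one, List.getElem?_eq_getElem hdroplen]
        simp [List.getElem_drop, hidx]
      have hexp : (((pl.length : Int) - 1).toNat) = pl.length - 1 := by omega
      have hroll := rk_rolling_modEq d q (tl[s]) (tl[s + pl.length])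
        ((tl.drop (s + 1)).take (pl.length - 1)) t (by rw [← hwdecomp]; exact hmeq)
      rw [hmidlen, ← hmid_eq, ← hexp] at hroll
      rw [hfst tot, hgs, hgsM]
      set E := d * (t - pvOrd (tl[s]) * PySem.Int.mod (d ^ (((pl.length : Int) - 1).toNat)) q)
          + pvOrd (tl[s + pl.length]) with hE
      have hb := PySem.Int.mod_neg_bounds (a := E) hq
      have hmeq1 : Int.ModEq q (PySem.Int.mod E q) (rkPoly d ((tl.drop (s + 1)).take pl.length) 0) :=
        (pymod_modEq E q).trans hroll
      by_cases hneg : PySem.Int.mod E q < 0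
      · rw [if_pos hlt2, if_pos hneg]
        have h3 := ih (s + 1)
          (tot + (if q ∣ rkPoly d pl 0 then
            (if (PySem.List.slice tl (some (s : Int)) (some ((s : Int) + (pl.length : Int))) == pl)
             then (1 : Int) else 0) else 0))
          (PySem.Int.mod E q + q) (by omega) (by omega)
          ((Int.modEq_iff_dvd.mpr ⟨-1, by ring⟩).trans hmeq1)
          (by omega)
        push_cast at h3
        rw [h3]
        by_cases hdvd : q ∣ rkPoly d pl 0
        · simp only [if_pos hdvd]
          by_cases hb2 : (PySem.List.slice tl (some (s : Int)) (some ((s : Int) + (pl.length : Int))) == pl) = true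
          · simp [hb2]; push_cast; ring
          · simp [hb2]
        · simp [hdvd]
      · rw [if_pos hlt2, if_neg hneg]
        have h3 := ih (s + 1)
          (tot + (if q ∣ rkPoly d pl 0 then
            (if (PySem.List.slice tl (some (s : Int)) (some ((s : Int) + (pl.length : Int))) == pl)
             then (1 : Int) else 0) else 0))
          (PySem.Int.mod E q) (by omega) (by omega) hmeq1 (by omega)
        push_cast at h3
        rw [h3]
        by_cases hdvd : q ∣ rkPoly d pl 0
        · simp only [if_pos hdvd]
          by_cases hb2 : (PySem.List.slice tl (some (s : Int)) (some ((s : Int) + (pl.length : Int))) == pl) = true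
          · simp [hb2]; push_cast; ring
          · simp [hb2]
        · simp [hdvd]

-- one pattern of the outer loop, q < 0: A counts every occurrence when q divides the
-- pattern's polynomial hash, and only a match at position 0 otherwise
lemma rkPat_neg (tl pl : List Char) (d q tot : Int) (hq : q < 0) (hpl : pl ≠ [])
    (hMN : pl.length ≤ tl.length) :
    rkPat tl d q tot pl
      = tot + (if q ∣ rkPoly d pl 0
          then (((PySem.List.pyRange 0 ((tl.length : Int) - (pl.length : Int) + 1) 1).countP
              (fun x => PySem.List.slice tl (some x) (some (x + (pl.length : Int))) == pl)) : Int)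
          else (if pl = tl.take pl.length then 1 else 0)) := by
  have hM1 : 0 < pl.length := List.length_pos_of_ne_nil hpl
  have h0lt : (0 : Int) < (tl.length : Int) - (pl.length : Int) + 1 := by
    have := Int.ofNat_le.2 hMN; omega
  simp only [rkPat]
  rw [rk_pre tl pl d q hMN]
  dsimp only
  rw [PySem.List.pyRange_one_cons h0lt, List.foldl_cons, List.countP_cons,
      show ((0:Int) + 1) = 1 from rfl]
  have hslice : PySem.List.slice tl (some (0 : Int)) (some ((0 : Int) + (pl.length : Int)))
      = tl.take pl.length := by
    simpa using PySem.List.slice_natCast_add tl 0 pl.length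
  -- the first component after the s = 0 step
  have hfst : (if rkHash d q pl 0 = rkHash d q (tl.take pl.length) 0 ∧
        pl = PySem.List.slice tl (some (0 : Int)) (some ((0 : Int) + (pl.length : Int)))
      then tot + 1 else tot) = tot + (if pl = tl.take pl.length then 1 else 0) := by
    rw [hslice]
    by_cases hpw : pl = tl.take pl.length
    · rw [if_pos ⟨congrArg (fun l => rkHash d q l 0) hpw, hpw⟩, if_pos hpw]
    · rw [if_neg (fun h => hpw h.2), if_neg hpw, add_zero]
  have hpred0 : ((PySem.List.slice tl (some (0 : Int)) (some ((0 : Int) + (pl.length : Int))) == pl))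
      = decide (pl = tl.take pl.length) := by
    rw [hslice]
    by_cases hpw : pl = tl.take pl.length
    · rw [decide_eq_true hpw]
      exact beq_iff_eq.mpr hpw.symm
    · rw [decide_eq_false hpw, beq_eq_false_iff_ne]
      exact fun h => hpw h.symm
  -- the final bookkeeping, shared by all branches below
  have hfin : ∀ c : Nat,
      tot + (if pl = tl.take pl.length then (1 : Int) else 0)
          + (if q ∣ rkPoly d pl 0 then (c : Int) else 0)
        = tot + (if q ∣ rkPoly d pl 0
            then ((c + (if decide (pl = tl.take pl.length) = true then 1 else 0) : Nat) : Int)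
            else (if pl = tl.take pl.length then 1 else 0)) := by
    intro c
    by_cases hdvd : q ∣ rkPoly d pl 0
    · rw [if_pos hdvd, if_pos hdvd]
      by_cases hpw : pl = tl.take pl.length
      · rw [if_pos hpw, if_pos (decide_eq_true hpw)]; push_cast; ring
      · rw [if_neg hpw, if_neg (by rw [decide_eq_false hpw]; simp)]; push_cast; ring
    · rw [if_neg hdvd, if_neg hdvd, add_zero]
  by_cases hNM : (0 : Int) < (tl.length : Int) - (pl.length : Int)
  · -- at least one rolling update: hand the state at s = 1 to the loop lemma
    have hlen1 : pl.length < tl.length := by omega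
    have hgs : PySem.List.pyGetD tl (0 : Int) ' ' = tl[0] := by
      rw [show ((0:Int)) = ((0:Nat):Int) from rfl, PySem.List.pyGetD_natCast]
      exact List.getD_eq_getElem tl ' ' (by omega)
    have hgsM : PySem.List.pyGetD tl ((0 : Int) + (pl.length : Int)) ' ' = tl[pl.length] := by
      rw [show ((0:Int) + (pl.length : Int)) = ((pl.length : Nat) : Int) by push_cast; ring,
          PySem.List.pyGetD_natCast]
      exact List.getD_eq_getElem tl ' ' hlen1
    have hcons : tl = tl[0] :: tl.drop 1 := by
      have h := List.drop_eq_getElem_cons (l := tl) (i := 0) (by omega)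
      simpa using h
    have hwdecomp : tl.take pl.length = tl[0] :: (tl.drop 1).take (pl.length - 1) := by
      conv_lhs => rw [hcons, show pl.length = (pl.length - 1) + 1 by omega,
        List.take_succ_cons]
    have hmidlen : ((tl.drop 1).take (pl.length - 1)).length = pl.length - 1 := by
      simp [List.length_take, List.length_drop]; omega
    have hdroplen : pl.length - 1 < (tl.drop 1).length := by
      simp [List.length_drop]; omega
    have hmid_eq : (tl.drop 1).take pl.length
        = (tl.drop 1).take (pl.length - 1) ++ [tl[pl.length]] := by
      conv_lhs => rw [show pl.length = (pl.length - 1) + 1 by omega]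
      rw [List.take_add_one, List.getElem?_eq_getElem hdroplen]
      simp [List.getElem_drop, show 1 + (pl.length - 1) = pl.length by omega,
        show pl.length - 1 + 1 = pl.length by omega]
    have hexp : (((pl.length : Int) - 1).toNat) = pl.length - 1 := by omega
    have hmeq0 : Int.ModEq q (rkHash d q (tl.take pl.length) 0)
        (rkPoly d (tl.take pl.length) 0) := by
      rw [hwdecomp, rkHash_eq_pymod d q (by omega)]
      exact pymod_modEq _ q
    have hroll := rk_rolling_modEq d q (tl[0]) (tl[pl.length])
      ((tl.drop 1).take (pl.length - 1)) (rkHash d q (tl.take pl.length) 0)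
      (by rw [← hwdecomp]; exact hwdecomp ▸ hmeq0)
    rw [hmidlen, ← hmid_eq, ← hexp] at hroll
    set E := d * (rkHash d q (tl.take pl.length) 0
        - pvOrd (PySem.List.pyGetD tl (0 : Int) ' ')
          * PySem.Int.mod (d ^ (((pl.length : Int) - 1).toNat)) q)
      + pvOrd (PySem.List.pyGetD tl ((0 : Int) + (pl.length : Int)) ' ') with hE
    have hEeq : E = d * (rkHash d q (tl.take pl.length) 0
        - pvOrd (tl[0]) * PySem.Int.mod (d ^ (((pl.length : Int) - 1).toNat)) q)
      + pvOrd (tl[pl.length]) := by rw [hE, hgs, hgsM]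
    have hb := PySem.Int.mod_neg_bounds (a := E) hq
    have hmeq1 : Int.ModEq q (PySem.Int.mod E q) (rkPoly d ((tl.drop 1).take pl.length) 0) := by
      refine (pymod_modEq E q).trans ?_
      rw [hEeq]
      exact hroll
    have hone : ((1 : Nat) : Int) = (1 : Int) := rfl
    by_cases hneg : PySem.Int.mod E q < 0
    · rw [if_pos hNM, if_pos hneg, hfst]
      have h3 := rk_loop_neg tl pl d q hq hpl hMN (tl.length - pl.length) 1
        (tot + (if pl = tl.take pl.length then 1 else 0)) (PySem.Int.mod E q + q)
        (by omega) (by omega)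
        ((Int.modEq_iff_dvd.mpr ⟨-1, by ring⟩).trans hmeq1) (by omega)
      rw [hone] at h3
      rw [h3, hpred0]
      exact hfin _
    · rw [if_pos hNM, if_neg hneg, hfst]
      have h3 := rk_loop_neg tl pl d q hq hpl hMN (tl.length - pl.length) 1
        (tot + (if pl = tl.take pl.length then 1 else 0)) (PySem.Int.mod E q)
        (by omega) (by omega) hmeq1 (by omega)
      rw [hone] at h3
      rw [h3, hpred0]
      exact hfin _
  · -- the pattern covers the whole text: the scan stops after s = 0
    have hend : ((tl.length : Int) - (pl.length : Int) + 1) ≤ (1 : Int) := by omega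
    rw [PySem.List.pyRange_one_eq_nil hend]
    simp only [List.foldl_nil, List.countP_nil, Nat.zero_add]
    rw [hfst, hpred0]
    have := hfin 0
    simpa using this

-- a fold that adds 1 under a condition counts the elements satisfying it
lemma rk_foldl_count (c p : Int → Prop) [DecidablePred c] [DecidablePred p] :
    ∀ (L : List Int) (tot : Int), (∀ x ∈ L, c x ↔ p x) →
    L.foldl (fun t x => if c x then t + 1 else t) tot
      = tot + ((L.countP (fun x => decide (p x))) : Int) := by
  intro L
  induction L with
  | nil => intro tot _; simp
  | cons x L ih =>
    intro tot h
    rw [List.foldl_cons, List.countP_cons, ih _ (fun y hy => h y (by simp [hy]))]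
    by_cases hc : c x
    · rw [if_pos hc]
      simp only [decide_eq_true ((h x (by simp)).mp hc)]
      push_cast; ring
    · rw [if_neg hc]
      have : ¬ p x := fun hp => hc ((h x (by simp)).mpr hp)
      simp only [decide_eq_false this]
      push_cast; ring

-- B's inner loop for one nonempty pattern: the first-character anchor is redundant,
-- so it counts exactly the start positions whose slice equals the pattern
lemma bPat_eq (tl pl : List Char) (tot : Int) (hpl : pl ≠ [])
    (hMN : pl.length ≤ tl.length) :
    (PySem.List.pyRange 0 ((tl.length : Int) - (pl.length : Int) + 1) 1).foldl
      (fun tot s =>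
        if PySem.List.pyGetD tl s ' ' = PySem.List.pyGetD pl 0 ' ' ∧
            PySem.List.slice tl (some s) (some (s + (pl.length : Int))) = pl
        then tot + 1 else tot) tot
    = tot + (((PySem.List.pyRange 0 ((tl.length : Int) - (pl.length : Int) + 1) 1).countP
        (fun s => PySem.List.slice tl (some s) (some (s + (pl.length : Int))) == pl)) : Int) := by
  have hM1 : 0 < pl.length := List.length_pos_of_ne_nil hpl
  have hcnt : ∀ s : Int,
      (PySem.List.slice tl (some s) (some (s + (pl.length : Int))) == pl) = true
        ↔ PySem.List.slice tl (some s) (some (s + (pl.length : Int))) = pl := by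
    intro s; exact beq_iff_eq
  have h := rk_foldl_count
    (fun s => PySem.List.pyGetD tl s ' ' = PySem.List.pyGetD pl 0 ' ' ∧
      PySem.List.slice tl (some s) (some (s + (pl.length : Int))) = pl)
    (fun s => PySem.List.slice tl (some s) (some (s + (pl.length : Int))) = pl)
    (PySem.List.pyRange 0 ((tl.length : Int) - (pl.length : Int) + 1) 1) tot ?_
  · rw [h]
    congr 1
    congr 1
    apply List.countP_congr
    intro s _
    simp [beq_iff_eq]
  · intro x hx
    rcases PySem.List.mem_pyRange_one.mp hx with ⟨hx0, hx1⟩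
    constructor
    · exact fun hc => hc.2
    · intro hsl
      refine ⟨?_, hsl⟩
      -- the slice equals the pattern, so the text's character at x is the pattern's first
      have hxn : x = ((x.toNat : Nat) : Int) := by omega
      have hfit : x.toNat + pl.length ≤ tl.length := by
        have hlen := congrArg List.length hsl
        rw [hxn, PySem.List.slice_natCast_add tl x.toNat pl.length] at hlen
        simp [List.length_take, List.length_drop] at hlen
        omega
      have hx2 : x.toNat < tl.length := by omega
      have hsl' : (tl.drop x.toNat).take pl.length = pl := by
        rw [hxn, PySem.List.slice_natCast_add tl x.toNat pl.length] at hsl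
        exact hsl
      have hg1 : PySem.List.pyGetD tl x ' ' = tl.getD x.toNat ' ' := by
        have hmx : (max x 0).toNat = x.toNat := by omega
        rw [hxn, PySem.List.pyGetD_natCast]; simp; rw [hmx]
      have hg2 : PySem.List.pyGetD pl 0 ' ' = pl.getD 0 ' ' := by
        rw [show (0 : Int) = ((0 : Nat) : Int) from rfl, PySem.List.pyGetD_natCast]
      have hhead : pl.getD 0 ' ' = tl.getD x.toNat ' ' := by
        conv_lhs => rw [← hsl']
        rw [List.getD_eq_getElem?_getD, List.getD_eq_getElem?_getD,
            List.getElem?_take_of_lt hM1, List.getElem?_drop]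
        simp
      rw [hg1, hg2, hhead]

-- an occurrence of the pattern at a start position ≥ 1 is an infix of the tail …
lemma occ_infix (tl pl : List Char) (n : Nat) (h1 : 1 ≤ n)
    (heq : (tl.drop n).take pl.length = pl) : pl <:+: tl.drop 1 := by
  have hinf1 : pl <:+: tl.drop n := heq ▸ (List.take_prefix _ _).isInfix
  have hdd : tl.drop n = (tl.drop 1).drop (n - 1) := by
    rw [List.drop_drop]; congr 1; omega
  exact hinf1.trans (hdd ▸ (List.drop_suffix _ _).isInfix)

-- … and conversely
lemma infix_occ (tl pl : List Char) (hpl : pl ≠ []) (hinf : pl <:+: tl.drop 1) :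
    ∃ n : Nat, 1 ≤ n ∧ n + pl.length ≤ tl.length ∧ (tl.drop n).take pl.length = pl := by
  obtain ⟨u, v, huv⟩ := hinf
  refine ⟨1 + u.length, by omega, ?_, ?_⟩
  · have hlen := congrArg List.length huv
    simp [List.length_drop] at hlen
    have htl : 0 < tl.length := by
      rcases Nat.eq_zero_or_pos tl.length with h0 | h; swap
      · exact h
      · exfalso
        have : pl.length = 0 := by omega
        exact hpl (List.eq_nil_of_length_eq_zero this)
    omega
  · have hdrop : tl.drop (1 + u.length) = pl ++ v := by
      rw [← List.drop_drop, ← huv]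
      rw [show u ++ pl ++ v = u ++ (pl ++ v) by simp, List.drop_left]
    rw [hdrop, List.take_left' rfl]

-- the count over the start positions from 1 on: zero without an occurrence there …
lemma cnt1_zero (tl pl : List Char) (hninf : ¬ pl <:+: tl.drop 1) :
    (PySem.List.pyRange 1 ((tl.length : Int) - (pl.length : Int) + 1) 1).countP
      (fun x => PySem.List.slice tl (some x) (some (x + (pl.length : Int))) == pl) = 0 := by
  apply List.countP_eq_zero.mpr
  intro x hx
  rcases PySem.List.mem_pyRange_one.mp hx with ⟨hx1, hx2⟩
  have hxn : x = ((x.toNat : Nat) : Int) := by omega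
  rw [hxn, PySem.List.slice_natCast_add tl x.toNat pl.length]
  simp only [Bool.not_eq_true]
  exact beq_eq_false_iff_ne.mpr (fun h => hninf (occ_infix tl pl x.toNat (by omega) h))

-- … and positive with one
lemma cnt1_pos (tl pl : List Char) (hpl : pl ≠ []) (hinf : pl <:+: tl.drop 1) :
    0 < (PySem.List.pyRange 1 ((tl.length : Int) - (pl.length : Int) + 1) 1).countP
      (fun x => PySem.List.slice tl (some x) (some (x + (pl.length : Int))) == pl) := by
  obtain ⟨n, h1, h2, heq⟩ := infix_occ tl pl hpl hinf
  apply List.countP_pos_iff.mpr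
  refine ⟨(n : Int), PySem.List.mem_pyRange_one.mpr ⟨by omega, by omega⟩, ?_⟩
  rw [PySem.List.slice_natCast_add tl n pl.length]
  exact beq_iff_eq.mpr heq

-- splitting the full count at position 0
lemma cnt_split (tl pl : List Char) (hpl : pl ≠ []) (hMN : pl.length ≤ tl.length) :
    (((PySem.List.pyRange 0 ((tl.length : Int) - (pl.length : Int) + 1) 1).countP
        (fun x => PySem.List.slice tl (some x) (some (x + (pl.length : Int))) == pl)) : Int)
      = (if pl = tl.take pl.length then 1 else 0)
        + (((PySem.List.pyRange 1 ((tl.length : Int) - (pl.length : Int) + 1) 1).countP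
            (fun x => PySem.List.slice tl (some x) (some (x + (pl.length : Int))) == pl)) : Int) := by
  have hM1 : 0 < pl.length := List.length_pos_of_ne_nil hpl
  have h0lt : (0 : Int) < (tl.length : Int) - (pl.length : Int) + 1 := by
    have := Int.ofNat_le.2 hMN; omega
  rw [PySem.List.pyRange_one_cons h0lt, List.countP_cons, show ((0:Int) + 1) = 1 from rfl]
  have hslice : PySem.List.slice tl (some (0 : Int)) (some ((0 : Int) + (pl.length : Int)))
      = tl.take pl.length := by
    simpa using PySem.List.slice_natCast_add tl 0 pl.length
  by_cases hpw : pl = tl.take pl.length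
  · rw [if_pos hpw, if_pos (by rw [hslice]; exact beq_iff_eq.mpr hpw.symm)]
    push_cast; ring
  · rw [if_neg hpw,
        if_neg (by rw [hslice]; simp [beq_eq_false_iff_ne.mpr (fun h => hpw h.symm)])]
    push_cast; ring

-- per-pattern summary used by the final theorems: what A adds for one pattern
lemma rkPat_sum (tl : List Char) (d q : Int) (hq : q < 0) (pats : List String)
    (hfit : ∀ p ∈ pats, p.toList ≠ [] ∧ p.toList.length ≤ tl.length) :
    pats.foldl (fun total pat => rkPat tl d q total pat.toList) 0
      = (pats.map (fun pat =>
          if q ∣ rkPoly d pat.toList 0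
          then (((PySem.List.pyRange 0 ((tl.length : Int) - (pat.toList.length : Int) + 1) 1).countP
              (fun x => PySem.List.slice tl (some x) (some (x + (pat.toList.length : Int))) == pat.toList)) : Int)
          else (if pat.toList = tl.take pat.toList.length then 1 else 0))).sum := by
  have h := PySem.List.foldl_congr_mem
    (l := pats) (init := (0 : Int))
    (f := fun total pat => rkPat tl d q total pat.toList)
    (g := fun total pat => total +
      (if q ∣ rkPoly d pat.toList 0
       then (((PySem.List.pyRange 0 ((tl.length : Int) - (pat.toList.length : Int) + 1) 1).countP
           (fun x => PySem.List.slice tl (some x) (some (x + (pat.toList.length : Int))) == pat.toList)) : Int)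
       else (if pat.toList = tl.take pat.toList.length then 1 else 0)))
    (fun acc p hp => rkPat_neg tl p.toList d q acc hq (hfit p hp).1 (hfit p hp).2)
  rw [h, PySem.List.foldl_add]
  simp

-- B as the sum of the per-pattern occurrence counts
lemma alt_sum (texto : String) (pats : List String) (d q : Int)
    (hfit : ∀ p ∈ pats, p.toList ≠ [] ∧ p.toList.length ≤ texto.toList.length) :
    rabin_karp_MATCHER_alt texto pats d q
      = (pats.map (fun pat =>
          (((PySem.List.pyRange 0 ((texto.toList.length : Int) - (pat.toList.length : Int) + 1) 1).countP
              (fun x => PySem.List.slice texto.toList (some x) (some (x + (pat.toList.length : Int))) == pat.toList)) : Int))).sum := by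
  simp only [rabin_karp_MATCHER_alt]
  have h := PySem.List.foldl_congr_mem
    (l := pats) (init := (0 : Int))
    (f := fun total pat =>
      (PySem.List.pyRange 0 ((texto.toList.length : Int) - (pat.toList.length : Int) + 1) 1).foldl
        (fun tot s =>
          if PySem.List.pyGetD texto.toList s ' ' = PySem.List.pyGetD pat.toList 0 ' ' ∧
              PySem.List.slice texto.toList (some s) (some (s + (pat.toList.length : Int))) = pat.toList
          then tot + 1 else tot) total)
    (g := fun total pat => total +
      (((PySem.List.pyRange 0 ((texto.toList.length : Int) - (pat.toList.length : Int) + 1) 1).countP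
          (fun s => PySem.List.slice texto.toList (some s) (some (s + (pat.toList.length : Int))) == pat.toList)) : Int))
    (fun acc p hp => bPat_eq texto.toList p.toList acc (hfit p hp).1 (hfit p hp).2)
  rw [h, PySem.List.foldl_add]
  simp

-- ===== VERDICT (by name: the statements are the Claim_ definitions above) =====
theorem rabin_karp_MATCHER_spec : Claim_unchanged_rabin_karp_MATCHER := by
  intro texto pats d q _hdom hpre
  unfold Spec_rabin_karp_MATCHER
  intro hnd
  obtain ⟨hq0, hfit⟩ := hpre
  rw [alt_sum texto pats d q hfit]
  rcases eq_or_ne pats [] with rfl | hne0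
  · rfl
  have hq0' : q ≠ 0 := hq0.resolve_left hne0
  simp only [rabin_karp_MATCHER]
  rcases lt_or_gt_of_ne hq0' with hq | hq
  · -- q < 0: outside D_ every pattern either has a q-divisible hash (all its
    -- occurrences are counted) or no occurrence after position 0
    rw [rkPat_sum texto.toList d q hq pats hfit]
    congr 1
    apply List.map_congr_left
    intro p hp
    by_cases hdvd : q ∣ rkPoly d p.toList 0
    · rw [if_pos hdvd]
    · rw [if_neg hdvd]
      have hninf : ¬ p.toList <:+: texto.toList.drop 1 :=
        fun hinf => hnd ⟨hq, p, hp, hdvd, hinf⟩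
      rw [cnt_split texto.toList p.toList (hfit p hp).1 (hfit p hp).2,
          cnt1_zero texto.toList p.toList hninf]
      simp
  · -- q > 0: the Rabin–Karp pass is exact
    have h := PySem.List.foldl_congr_mem
      (l := pats) (init := (0 : Int))
      (f := fun total pat => rkPat texto.toList d q total pat.toList)
      (g := fun total pat => total +
        (((PySem.List.pyRange 0 ((texto.toList.length : Int) - (pat.toList.length : Int) + 1) 1).countP
            (fun x => PySem.List.slice texto.toList (some x) (some (x + (pat.toList.length : Int))) == pat.toList)) : Int))
      (fun acc p hp => rkPat_eq texto.toList p.toList d q acc hq (hfit p hp).1 (hfit p hp).2)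
    rw [h, PySem.List.foldl_add]
    simp

theorem rabin_karp_MATCHER_tight : Claim_exact_rabin_karp_MATCHER := by
  intro texto pats d q _hdom hpre hd
  obtain ⟨hq, p0, hp0, hnd0, hinf0⟩ := hd
  obtain ⟨hq0, hfit⟩ := hpre
  apply ne_of_lt
  rw [alt_sum texto pats d q hfit]
  simp only [rabin_karp_MATCHER]
  rw [rkPat_sum texto.toList d q hq pats hfit]
  apply List.sum_lt_sum
  · -- A never counts more than the occurrences
    intro p hp
    by_cases hdvd : q ∣ rkPoly d p.toList 0
    · rw [if_pos hdvd]
    · rw [if_neg hdvd, cnt_split texto.toList p.toList (hfit p hp).1 (hfit p hp).2]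
      have : (0 : Int) ≤ (((PySem.List.pyRange 1 ((texto.toList.length : Int) - (p.toList.length : Int) + 1) 1).countP
          (fun x => PySem.List.slice texto.toList (some x) (some (x + (p.toList.length : Int))) == p.toList)) : Int) := by positivity
      omega
  · -- and for the pattern D_ names it misses at least one
    refine ⟨p0, hp0, ?_⟩
    rw [if_neg hnd0, cnt_split texto.toList p0.toList (hfit p0 hp0).1 (hfit p0 hp0).2]
    have hpos := cnt1_pos texto.toList p0.toList (hfit p0 hp0).1 hinf0
    have : (1 : Int) ≤ (((PySem.List.pyRange 1 ((texto.toList.length : Int) - (p0.toList.length : Int) + 1) 1).countP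
        (fun x => PySem.List.slice texto.toList (some x) (some (x + (p0.toList.length : Int))) == p0.toList)) : Int) := by
      exact_mod_cast hpos
    omega

theorem rabin_karp_MATCHER_changed : Claim_changed_rabin_karp_MATCHER := by
  unfold Claim_changed_rabin_karp_MATCHER; decide

theorem rabin_karp_MATCHER_raises : Claim_raises_rabin_karp_MATCHER := by
  unfold Claim_raises_rabin_karp_MATCHER
  refine ⟨?_, by decide⟩
  intro texto pats d q _hdom hr hpre
  obtain ⟨hall, hcase⟩ := hr
  obtain ⟨hq0, hfit⟩ := hpre
  rcases hcase with ⟨hne, hq⟩ | ⟨p, hp, hlong⟩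
  · exact (hq0.resolve_left hne) hq
  · exact absurd (hfit p hp).2 (by omega)

-- self-check: the raise witness really lies inside Raises_ (read off the theorem above)
theorem rabin_karp_MATCHER_raises_witness_ok :
    Raises_rabin_karp_MATCHER "ab" ["abc"] 256 7 := rabin_karp_MATCHER_raises.2.2.1
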